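-- pv_equiv track=rewrite | github.com/daniel-reich/ubiquitous-fiesta | Y4gwcGfcGb3SKz6Tu_17.py | max_separator
-- ===== SOURCE A (Python) =====
-- def max_separator(txt):
--   mx = 0
--   lst = []
--   for i in range(len(txt)):
--     for j in range(i+1,len(txt)):
--       if txt[i]==txt[j]:
--         if len(txt[i:j+1])>mx:
--           mx = len(txt[i:j+1])
--           lst = [txt[i]]
--         elif len(txt[i:j+1])==mx:
--           lst.append(txt[i])
--         break
--   return sorted(lst)
-- ===== SOURCE B (Python) =====
-- def max_separator(txt):
--     # One right-to-left pass: for each position, the nearest later occurrence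
--     # of its character is read off a last-seen table, instead of an inner scan.
--     last = {}
--     best = 0
--     res = []
--     for i in range(len(txt) - 1, -1, -1):
--         c = txt[i]
--         if c in last:
--             span = last[c] - i + 1
--             if span > best:
--                 best = span
--                 res = [c]
--             elif span == best:
--                 res.append(c)
--         last[c] = i
--     return sorted(res)
-- ===== Notes on version B (the rewrite author's own statement) =====
-- stated objective: faster
-- what changed: Replaces A's quadratic per-position inner scan (and slicing) for the next repeat by a single right-to-left pass that reads each position's nearest later occurrence off a last-seen dictionary while tracking the max span and its argmax characters.
import Mathlib
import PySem

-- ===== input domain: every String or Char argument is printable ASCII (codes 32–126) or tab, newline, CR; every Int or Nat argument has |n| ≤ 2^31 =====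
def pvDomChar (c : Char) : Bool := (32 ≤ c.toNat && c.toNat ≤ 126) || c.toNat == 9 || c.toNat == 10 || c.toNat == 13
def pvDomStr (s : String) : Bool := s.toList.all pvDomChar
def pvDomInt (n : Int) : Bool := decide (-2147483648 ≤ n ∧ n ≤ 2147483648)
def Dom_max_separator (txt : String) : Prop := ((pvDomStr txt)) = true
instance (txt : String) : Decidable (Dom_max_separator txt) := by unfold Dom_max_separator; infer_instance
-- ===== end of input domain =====

-- B replaces A's quadratic inner scan by one right-to-left pass over the string
-- that reads each position's nearest later repeat off a last-seen table.

-- ===== PORT A =====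
-- inner loop: for j in range(i+1, len(txt)): if txt[i]==txt[j]: …; break
def aInner (cs : List Char) (i : Nat) : List Nat → Int × List String → Int × List String
  | [], st => st
  | j :: js, (mx, lst) =>
    if cs.getD i ' ' == cs.getD j ' ' then
      let L : Int := ((PySem.List.slice cs (some (i : Int)) (some ((j : Int) + 1))).length : Int)
      if L > mx then (L, [String.ofList [cs.getD i ' ']])
      else if L = mx then (mx, lst ++ [String.ofList [cs.getD i ' ']])
      else (mx, lst)
    else aInner cs i js (mx, lst)

def max_separator (txt : String) : List String :=
  let cs := txt.toList
  let n := cs.length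
  let st := (List.range n).foldl
    (fun st i => aInner cs i (List.range' (i + 1) (n - (i + 1))) st) ((0 : Int), ([] : List String))
  PySem.List.sorted st.2 (fun x => x) false

-- ===== PORT B =====
def bStep (cs : List Char) (st : PySem.Dict Char Nat × Int × List String) (i : Nat) :
    PySem.Dict Char Nat × Int × List String :=
  let c := cs.getD i ' '
  let s' : Int × List String :=
    match st.1.get? c with
    | some j =>
        let span : Int := (j : Int) - (i : Int) + 1
        if span > st.2.1 then (span, [String.ofList [c]])
        else if span = st.2.1 then (st.2.1, st.2.2 ++ [String.ofList [c]])
        else st.2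
    | none => st.2
  (st.1.insert c i, s')

def max_separator_alt (txt : String) : List String :=
  let cs := txt.toList
  let st := ((List.range cs.length).reverse).foldl (bStep cs) (PySem.Dict.empty, (0 : Int), ([] : List String))
  PySem.List.sorted st.2.2 (fun x => x) false

-- ===== PRECONDITION & SPEC =====
def Spec_max_separator (txt : String) (out : List String) : Prop := out = max_separator_alt txt
instance (txt : String) (out : List String) : Decidable (Spec_max_separator txt out) := by unfold Spec_max_separator; infer_instance

-- ===== CLAIM (what is proved, stated in full; the proofs are below) =====
def Claim_equal_max_separator : Prop := ∀ (txt : String), Dom_max_separator txt → Spec_max_separator txt (max_separator txt)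

-- ===== LEMMAS AND PROOFS =====

-- index of the first later occurrence of cs[i]
def nxt (cs : List Char) (i : Nat) : Option Nat :=
  (List.range' (i + 1) (cs.length - (i + 1))).find? (fun j => cs.getD i ' ' == cs.getD j ' ')

-- common abstract step: one position, its char and (span to its next repeat)?
def genStep (st : Int × List String) (p : Char × Option Int) : Int × List String :=
  match p.2 with
  | none => st
  | some s =>
      if s > st.1 then (s, [String.ofList [p.1]])
      else if s = st.1 then (st.1, st.2 ++ [String.ofList [p.1]])
      else st

def entry (cs : List Char) (i : Nat) : Char × Option Int :=
  (cs.getD i ' ', (nxt cs i).map (fun j => (j : Int) - (i : Int) + 1))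

-- running maximum of the spans
def msp (Q : List (Char × Option Int)) (m : Int) : Int :=
  Q.foldl (fun m p => match p.2 with | some s => max m s | none => m) m

theorem le_msp (Q : List (Char × Option Int)) (m : Int) : m ≤ msp Q m := by
  induction Q generalizing m with
  | nil => simp [msp]
  | cons p Q ih =>
    cases hp : p.2 with
    | none => simpa [msp, hp] using ih m
    | some s => exact le_trans (le_max_left m s) (by simpa [msp, hp] using ih (max m s))

theorem msp_max (Q : List (Char × Option Int)) (a s : Int) :
    msp Q (max a s) = max (msp Q a) s := by
  induction Q generalizing a with
  | nil => simp [msp]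
  | cons p Q ih =>
    cases hp : p.2 with
    | none => simpa [msp, hp] using ih a
    | some t =>
      simp only [msp, List.foldl_cons, hp] at *
      rw [show max (max a s) t = max (max a t) s by omega, ih]

theorem msp_reverse (Q : List (Char × Option Int)) (m : Int) : msp Q.reverse m = msp Q m := by
  induction Q generalizing m with
  | nil => rfl
  | cons p Q ih =>
    cases hp : p.2 with
    | none =>
      simp only [List.reverse_cons, msp, List.foldl_append, List.foldl_cons, List.foldl_nil, hp]
      simpa [msp, hp] using ih m
    | some s =>
      have h1 : msp (p :: Q).reverse m = max (msp Q.reverse m) s := by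
        simp [List.reverse_cons, msp, List.foldl_append, hp]
      have h2 : msp (p :: Q) m = msp Q (max m s) := by simp [msp, hp]
      rw [h1, ih m, h2, msp_max]

-- the characterization of the fold: final max and, in order, the argmax chars
theorem genStep_foldl (Q : List (Char × Option Int)) (mx : Int) (lst : List String) :
    Q.foldl genStep (mx, lst) =
      (msp Q mx,
       (if msp Q mx = mx then lst else []) ++
         Q.filterMap (fun p => if p.2 = some (msp Q mx) then some (String.ofList [p.1]) else none)) := by
  induction Q generalizing mx lst with
  | nil => simp [msp]
  | cons p Q ih =>
    cases hp : p.2 with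
    | none =>
      have hm : msp (p :: Q) mx = msp Q mx := by simp [msp, hp]
      simp only [List.foldl_cons, genStep, hp, List.filterMap_cons, hm]
      exact ih mx lst
    | some s =>
      have hm : msp (p :: Q) mx = msp Q (max mx s) := by simp [msp, hp]
      simp only [List.foldl_cons, genStep, hp, List.filterMap_cons, hm]
      by_cases hgt : s > mx
      · have hmax : max mx s = s := by omega
        rw [if_pos hgt, ih s [String.ofList [p.1]], hmax]
        have hsle : s ≤ msp Q s := le_msp Q s
        have hne : ¬ msp Q s = mx := by omega
        by_cases he : msp Q s = s
        · simp [he]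
          intro h; omega
        · have h3 : ¬ (some s = some (msp Q s)) := by
            simp only [Option.some.injEq]; omega
          simp [hne, he, h3]
      · rw [if_neg hgt]
        by_cases he : s = mx
        · subst he
          have hmax : max s s = s := by omega
          rw [if_pos rfl, ih s (lst ++ [String.ofList [p.1]]), hmax]
          by_cases h2 : msp Q s = s
          · simp [h2]
          · have h3 : ¬ (some s = some (msp Q s)) := by
              simp only [Option.some.injEq]; omega
            simp [h2, h3]
        · have hmax : max mx s = mx := by omega
          rw [if_neg he, ih mx lst, hmax]
          have hle : mx ≤ msp Q mx := le_msp Q mx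
          have h3 : ¬ (some s = some (msp Q mx)) := by
            simp only [Option.some.injEq]; omega
          simp [h3]

theorem main_lists (cs : List Char) :
    ((((List.range cs.length).map (entry cs)).foldl genStep ((0:Int), ([] : List String))).2).Perm
      (((((List.range cs.length).map (entry cs)).reverse).foldl genStep ((0:Int), ([] : List String))).2) := by
  rw [genStep_foldl, genStep_foldl, msp_reverse, List.filterMap_reverse]
  simp only [ite_self, List.nil_append]
  exact (List.reverse_perm _).symm

-- A's inner loop = genStep on the first-match option
theorem aInner_eq (cs : List Char) (i : Nat) (js : List Nat) (mx : Int) (lst : List String)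
    (hjs : ∀ j ∈ js, i < j ∧ j < cs.length) :
    aInner cs i js (mx, lst) =
      match js.find? (fun j => cs.getD i ' ' == cs.getD j ' ') with
      | none => (mx, lst)
      | some j => genStep (mx, lst) (cs.getD i ' ', some ((j : Int) - (i : Int) + 1)) := by
  induction js with
  | nil => simp [aInner]
  | cons j js ih =>
    obtain ⟨hij, hjn⟩ := hjs j (by simp)
    by_cases h : cs.getD i ' ' == cs.getD j ' '
    · have hf : List.find? (fun j => cs.getD i ' ' == cs.getD j ' ') (j :: js) = some j :=
        List.find?_cons_of_pos h
      rw [hf]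
      have hL : ((PySem.List.slice cs (some (i : Int)) (some ((j : Int) + 1))).length : Int)
          = (j : Int) - (i : Int) + 1 := by
        have hcast : ((j : Int) + 1) = ((j + 1 : Nat) : Int) := by push_cast; ring
        rw [hcast, PySem.List.slice_natCast]
        simp only [List.length_take, List.length_drop]
        omega
      show (if cs.getD i ' ' == cs.getD j ' ' then _ else _) = _
      rw [if_pos h, hL]
      rfl
    · have hf : List.find? (fun j => cs.getD i ' ' == cs.getD j ' ') (j :: js)
          = List.find? (fun j => cs.getD i ' ' == cs.getD j ' ') js :=
        List.find?_cons_of_neg (by simpa using h)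
      rw [hf]
      have hstep : aInner cs i (j :: js) (mx, lst) = aInner cs i js (mx, lst) := by
        show (if cs.getD i ' ' == cs.getD j ' ' then _ else _) = _
        rw [if_neg h]
      rw [hstep, ih (fun j hj => hjs j (by simp [hj]))]

theorem a_fold (cs : List Char) :
    (List.range cs.length).foldl
      (fun st i => aInner cs i (List.range' (i + 1) (cs.length - (i + 1))) st) ((0:Int), ([] : List String)) =
    ((List.range cs.length).map (entry cs)).foldl genStep ((0:Int), ([] : List String)) := by
  rw [List.foldl_map]
  apply PySem.List.foldl_congr_mem
  intro st i hi
  obtain ⟨mx, lst⟩ := st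
  rw [aInner_eq cs i _ mx lst (by
    intro j hj
    rw [List.mem_range'] at hj
    rw [List.mem_range] at hi
    omega)]
  unfold entry nxt genStep
  cases (List.range' (i + 1) (cs.length - (i + 1))).find?
      (fun j => cs.getD i ' ' == cs.getD j ' ') with
  | none => simp
  | some j => simp


theorem b_fold (cs : List Char) (m : Nat) :
    ∀ (d : PySem.Dict Char Nat) (s : Int × List String), m ≤ cs.length →
      (∀ c, d.get? c = (List.range' m (cs.length - m)).find? (fun j => c == cs.getD j ' ')) →
      (((List.range m).reverse).foldl (bStep cs) (d, s)).2 =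
        (((List.range m).map (entry cs)).reverse).foldl genStep s := by
  induction m with
  | zero => intro d s _ _; simp
  | succ m ih =>
    intro d s hm hd
    have hrev : (List.range (m + 1)).reverse = m :: (List.range m).reverse := by
      rw [List.range_succ]; simp
    have hrev2 : ((List.range (m + 1)).map (entry cs)).reverse
        = entry cs m :: ((List.range m).map (entry cs)).reverse := by
      rw [List.range_succ]; simp
    rw [hrev, hrev2, List.foldl_cons, List.foldl_cons]
    have hget : d.get? (cs.getD m ' ') = nxt cs m := hd (cs.getD m ' ')
    have hb : bStep cs (d, s) m = (d.insert (cs.getD m ' ') m, genStep s (entry cs m)) := by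
      show (d.insert (cs.getD m ' ') m,
          match d.get? (cs.getD m ' ') with
          | some j =>
              if ((j : Int) - (m : Int) + 1) > s.1 then
                (((j : Int) - (m : Int) + 1), [String.ofList [cs.getD m ' ']])
              else if ((j : Int) - (m : Int) + 1) = s.1 then
                (s.1, s.2 ++ [String.ofList [cs.getD m ' ']])
              else s
          | none => s) = _
      rw [hget]
      cases hn : nxt cs m with
      | none => simp [entry, genStep, hn]
      | some j => simp [entry, genStep, hn]
    rw [hb]
    apply ih _ _ (by omega)
    intro c'
    have hr : List.range' m (cs.length - m) = m :: List.range' (m + 1) (cs.length - (m + 1)) := by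
      rw [show cs.length - m = (cs.length - (m + 1)) + 1 by omega, List.range'_succ]
    rw [hr]
    by_cases hc : c' = cs.getD m ' '
    · subst hc
      rw [PySem.Dict.get?_insert_self _ _, List.find?_cons_of_pos (by simp)]
    · rw [PySem.Dict.get?_insert_of_ne _ _ hc, hd c', List.find?_cons_of_neg (by simpa using hc)]

-- ===== VERDICT (by name: the statement is the Claim_ definition above) =====
theorem max_separator_spec : Claim_equal_max_separator := by
  intro txt _
  unfold Spec_max_separator
  simp only [max_separator, max_separator_alt]
  rw [a_fold]
  rw [b_fold txt.toList txt.toList.length PySem.Dict.empty ((0 : Int), ([] : List String)) le_rfl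
    (by intro c; simp [PySem.Dict.get?_empty])]
  exact PySem.List.sorted_eq_sorted_of_perm _ _ (fun x => x) (fun a b h => h) (main_lists txt.toList)
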